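-- pv_equiv track=rewrite | github.com/Madman12321/pycharm-project-2 | alsoskill.py | getDaysInMonth
-- ===== SOURCE A (Python) =====
-- def getDaysInMonth(month, year):
--     '''
--     Returns the number of days in a month.
--     :param month: a month value between 1 and 12 representing January to December, respectively.
--     :param year: the year for that month.
--     :returns: Number of days in the month. If month does not fall in the range 1 to 12 inclusively, a -1 is returned.
--     :rtype: integer
--     '''
--     for i in range(1, 13):
--         if month == 1:
--             return 31
--         elif month == 2:
--             return 28
--         elif month == 3:
--             return 31
--         elif month == 4:
--             return 30
--         elif month == 5:
--             return 31
--         elif month == 6: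
--             return 30
--         elif month == 7:
--             return 31
--         elif month == 8:
--             return 31
--         elif month == 9:
--             return 30
--         elif month == 10:
--             return 31
--         elif month == 11:
--             return 30
--         elif month == 12:
--             return 31
--         elif month != range(1, 13):
--             return -1
-- ===== SOURCE B (Python) =====
-- _DAYS = [31, 28, 31, 30, 31, 30, 31, 31, 30, 31, 30, 31]
--
-- def getDaysInMonth(month, year):
--     if 1 <= month <= 12:
--         return _DAYS[month - 1]
--     return -1
-- ===== Notes on version B (the rewrite author's own statement) =====
-- stated objective: simpler
-- what changed: Replaces the twelve-branch if/elif cascade inside a dead for-loop with a precomputed month-length table indexed by month-1 behind a single range guard.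
import Mathlib
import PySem

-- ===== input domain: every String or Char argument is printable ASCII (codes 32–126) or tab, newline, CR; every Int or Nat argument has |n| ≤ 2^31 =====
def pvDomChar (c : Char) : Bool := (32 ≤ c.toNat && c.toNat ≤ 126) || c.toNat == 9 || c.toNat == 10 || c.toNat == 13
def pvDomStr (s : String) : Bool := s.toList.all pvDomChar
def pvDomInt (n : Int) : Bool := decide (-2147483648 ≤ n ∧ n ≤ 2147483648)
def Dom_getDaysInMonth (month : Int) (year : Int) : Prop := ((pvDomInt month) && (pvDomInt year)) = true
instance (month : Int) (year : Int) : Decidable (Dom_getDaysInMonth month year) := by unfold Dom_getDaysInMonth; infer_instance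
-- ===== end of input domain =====

-- B replaces A's twelve-branch if/elif cascade (and its dead loop) with a month-length table lookup; equivalence is proved on all Int inputs.

-- ===== PORT A =====
-- Port of A: the if/elif cascade; the for-loop always returns on its first iteration,
-- and the final 'month != range(1,13)' comparison is always true for an Int month.
def getDaysInMonth (month : Int) (year : Int) : Int :=
  if month == 1 then 31
  else if month == 2 then 28
  else if month == 3 then 31
  else if month == 4 then 30
  else if month == 5 then 31
  else if month == 6 then 30
  else if month == 7 then 31
  else if month == 8 then 31
  else if month == 9 then 30
  else if month == 10 then 31
  else if month == 11 then 30
  else if month == 12 then 31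
  else -1

-- ===== PORT B =====
-- B: table of month lengths, one lookup behind a range guard.
def pvDaysTable : List Int := [31, 28, 31, 30, 31, 30, 31, 31, 30, 31, 30, 31]

def getDaysInMonth_alt (month : Int) (year : Int) : Int :=
  if 1 ≤ month ∧ month ≤ 12 then
    (PySem.List.pyGet? pvDaysTable (month - 1)).getD (-1)
  else -1

-- ===== PRECONDITION & SPEC =====
def Spec_getDaysInMonth (month : Int) (year : Int) (out : Int) : Prop := out = getDaysInMonth_alt month year
instance (month : Int) (year : Int) (out : Int) : Decidable (Spec_getDaysInMonth month year out) := by unfold Spec_getDaysInMonth; infer_instance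

-- ===== CLAIM (what is proved, stated in full; the proofs are below) =====
def Claim_equal_getDaysInMonth : Prop := ∀ (month : Int) (year : Int), Dom_getDaysInMonth month year → Spec_getDaysInMonth month year (getDaysInMonth month year)

-- ===== LEMMAS AND PROOFS =====

-- ===== VERDICT (by name: the statement is the Claim_ definition above) =====
theorem getDaysInMonth_spec : Claim_equal_getDaysInMonth := by
  intro month year _
  unfold Spec_getDaysInMonth getDaysInMonth getDaysInMonth_alt
  by_cases h : 1 ≤ month ∧ month ≤ 12
  · obtain ⟨h1, h2⟩ := h
    interval_cases month <;> decide
  · have : ¬ month = 1 ∧ ¬ month = 2 ∧ ¬ month = 3 ∧ ¬ month = 4 ∧ ¬ month = 5 ∧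
        ¬ month = 6 ∧ ¬ month = 7 ∧ ¬ month = 8 ∧ ¬ month = 9 ∧ ¬ month = 10 ∧
        ¬ month = 11 ∧ ¬ month = 12 := by omega
    simp [this.1, this.2.1, this.2.2.1, this.2.2.2.1, this.2.2.2.2.1, this.2.2.2.2.2.1,
      this.2.2.2.2.2.2.1, this.2.2.2.2.2.2.2.1, this.2.2.2.2.2.2.2.2.1,
      this.2.2.2.2.2.2.2.2.2.1, this.2.2.2.2.2.2.2.2.2.2.1, this.2.2.2.2.2.2.2.2.2.2.2, h]
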